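-- pv_equiv track=rewrite | github.com/khelina/T-cell-lineages-tracking | DeepKymoTracker/functions.py | find_closest_coord
-- ===== SOURCE A (Python) =====
-- def find_closest_coord(cX,cY,coords):
--   distances=[]
--   numbers=[]
--   for i in range(len(coords)):
--           second=coords[i]
--           x2,y2=second[0],second[1]
--           dist=(cX-x2)**2+(cY-y2)**2
--           distances.append(dist)
--           numbers.append(i)
--   index=distances.index(min(distances))
--   number=numbers[index]
--   return number
-- ===== SOURCE B (Python) =====
-- def find_closest_coord(cX, cY, coords):
--     best_i = 0
--     best_d = None
--     for i, (x2, y2) in enumerate(coords):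
--         d = (cX - x2) ** 2 + (cY - y2) ** 2
--         if best_d is None or d < best_d:
--             best_i, best_d = i, d
--     return best_i
-- ===== Notes on version B (the rewrite author's own statement) =====
-- stated objective: simpler
-- what changed: Replaces the three-pass structure (build distance and index lists, then min(), then list.index(), then lookup) with a single pass keeping a running best index and best squared distance, with strict < so ties keep the first minimal index.
import Mathlib
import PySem

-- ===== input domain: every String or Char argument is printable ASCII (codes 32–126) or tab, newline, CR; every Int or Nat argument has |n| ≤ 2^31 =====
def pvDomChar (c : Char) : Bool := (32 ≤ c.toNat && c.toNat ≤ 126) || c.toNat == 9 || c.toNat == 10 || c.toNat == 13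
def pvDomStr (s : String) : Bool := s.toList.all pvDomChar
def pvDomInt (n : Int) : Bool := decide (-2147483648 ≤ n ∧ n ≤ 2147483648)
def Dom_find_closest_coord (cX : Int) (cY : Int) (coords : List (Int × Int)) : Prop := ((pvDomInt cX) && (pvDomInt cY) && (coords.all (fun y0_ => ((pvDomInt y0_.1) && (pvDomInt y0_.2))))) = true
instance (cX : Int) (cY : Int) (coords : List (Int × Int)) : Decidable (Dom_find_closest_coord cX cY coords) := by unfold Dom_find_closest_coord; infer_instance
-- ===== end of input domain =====

-- B replaces A's build-lists / min() / index() / lookup pipeline by a single pass keeping a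
-- running best index and strictly smaller best squared distance (objective: simpler).

-- ===== PORT A =====
def find_closest_coord (cX : Int) (cY : Int) (coords : List (Int × Int)) : Int :=
  let st := (PySem.List.pyRange 0 (coords.length : Int) 1).foldl
    (fun (acc : List Int × List Int) i =>
      match PySem.List.pyGet? coords i with
      | some second =>
          (acc.1 ++ [(cX - second.1) ^ 2 + (cY - second.2) ^ 2], acc.2 ++ [i])
      | none => acc)   -- unreachable: i ranges over range(len(coords))
    ([], [])
  match PySem.List.min? st.1 (fun d => d) with
  | none => 0          -- Python: min([]) raises ValueError; excluded by Pre_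
  | some m =>
    match PySem.List.index? st.1 m with
    | none => 0        -- unreachable: m ∈ st.1
    | some idx =>
      match PySem.List.pyGet? st.2 (idx : Int) with
      | some number => number
      | none => 0      -- unreachable: idx < len(st.2)

-- ===== PORT B =====
def find_closest_coord_alt (cX : Int) (cY : Int) (coords : List (Int × Int)) : Int :=
  ((PySem.List.enumerate coords 0).foldl
    (fun (acc : Int × Option Int) p =>
      let d := (cX - p.2.1) ^ 2 + (cY - p.2.2) ^ 2
      match acc.2 with
      | none => (p.1, some d)
      | some bd => if d < bd then (p.1, some d) else acc)
    (0, none)).1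

-- ===== PRECONDITION & SPEC =====
-- Pre_ excludes only the empty list, on which Python A raises ValueError (min() of an empty sequence).
def Pre_find_closest_coord (cX : Int) (cY : Int) (coords : List (Int × Int)) : Prop := coords ≠ []
instance (cX : Int) (cY : Int) (coords : List (Int × Int)) : Decidable (Pre_find_closest_coord cX cY coords) := by unfold Pre_find_closest_coord; infer_instance
def pvWitness_find_closest_coord : Int × Int × (List (Int × Int)) := (0, 0, [(1, 2)])

def Spec_find_closest_coord (cX : Int) (cY : Int) (coords : List (Int × Int)) (out : Int) : Prop := out = find_closest_coord_alt cX cY coords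
instance (cX : Int) (cY : Int) (coords : List (Int × Int)) (out : Int) : Decidable (Spec_find_closest_coord cX cY coords out) := by unfold Spec_find_closest_coord; infer_instance

-- ===== CLAIM (what is proved, stated in full; the proofs are below) =====
def Claim_equal_find_closest_coord : Prop := ∀ (cX : Int) (cY : Int) (coords : List (Int × Int)), Dom_find_closest_coord cX cY coords → Pre_find_closest_coord cX cY coords → Spec_find_closest_coord cX cY coords (find_closest_coord cX cY coords)

-- ===== LEMMAS AND PROOFS =====

-- the squared distance both programs compute
def pvDist (cX cY : Int) (p : Int × Int) : Int := (cX - p.1) ^ 2 + (cY - p.2) ^ 2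

-- A's loop body and B's loop body, named (definitionally equal to the lambdas in the ports)
def pvStepA (cX cY : Int) (coords : List (Int × Int)) (acc : List Int × List Int) (i : Int) : List Int × List Int :=
  match PySem.List.pyGet? coords i with
  | some second =>
      (acc.1 ++ [(cX - second.1) ^ 2 + (cY - second.2) ^ 2], acc.2 ++ [i])
  | none => acc

def pvStepB (cX cY : Int) (acc : Int × Option Int) (p : Int × (Int × Int)) : Int × Option Int :=
  let d := (cX - p.2.1) ^ 2 + (cY - p.2.2) ^ 2
  match acc.2 with
  | none => (p.1, some d)
  | some bd => if d < bd then (p.1, some d) else acc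

theorem pvFoldlMinMin (l : List Int) : ∀ (a b : Int), l.foldl min (min a b) = min a (l.foldl min b) := by
  induction l with
  | nil => intro a b; rfl
  | cons x t ih =>
    intro a b
    simp only [List.foldl_cons]
    rw [min_assoc, ih]

theorem pvIdxOf?_of_mem (xs : List Int) (v : Int) (h : v ∈ xs) : xs.idxOf? v = some (xs.idxOf v) := by
  induction xs with
  | nil => simp at h
  | cons x t ih =>
    by_cases hx : x = v
    · subst hx; simp [List.idxOf?_cons]
    · have hv : v ∈ t := by
        rcases List.mem_cons.mp h with h1 | h1
        · exact absurd h1.symm hx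
        · exact h1
      simp [List.idxOf?_cons, hx, ih hv]

-- A's loop builds (the list of squared distances, the list of indices)
theorem pvAFold (cX cY : Int) : ∀ (suf pre : List (Int × Int)) (acc1 acc2 : List Int),
    (PySem.List.pyRange (pre.length : Int) ((pre.length : Int) + (suf.length : Int)) 1).foldl
      (pvStepA cX cY (pre ++ suf)) (acc1, acc2)
    = (acc1 ++ suf.map (pvDist cX cY),
       acc2 ++ PySem.List.pyRange (pre.length : Int) ((pre.length : Int) + (suf.length : Int)) 1) := by
  intro suf
  induction suf with
  | nil => intro pre acc1 acc2; simp [PySem.List.pyRange_one_eq_nil]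
  | cons s rest ih =>
    intro pre acc1 acc2
    have hlt : (pre.length : Int) < (pre.length : Int) + ((s :: rest).length : Int) := by
      simp
    rw [PySem.List.pyRange_one_cons hlt, List.foldl_cons]
    have hget : PySem.List.pyGet? (pre ++ s :: rest) ((pre.length : Nat) : Int) = some s := by
      rw [PySem.List.pyGet?_natCast]
      simp
    have hstep : pvStepA cX cY (pre ++ s :: rest) (acc1, acc2) ((pre.length : Nat) : Int)
        = (acc1 ++ [pvDist cX cY s], acc2 ++ [(pre.length : Int)]) := by
      simp only [pvStepA, hget, pvDist]
    rw [hstep]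
    have hre : pre ++ s :: rest = (pre ++ [s]) ++ rest := by simp
    have hlen : ((pre ++ [s]).length : Int) = (pre.length : Int) + 1 := by simp
    have := ih (pre ++ [s]) (acc1 ++ [pvDist cX cY s]) (acc2 ++ [(pre.length : Int)])
    rw [hlen] at this
    rw [hre, show ((pre.length : Int) + ((s :: rest).length : Int)) = (pre.length : Int) + 1 + (rest.length : Int) by simp; omega]
    rw [this]
    simp

-- B's running strict minimum over an enumerated tail lands on the first argmin
theorem pvBFold (cX cY : Int) : ∀ (l : List (Int × Int)) (k bi bd : Int),
    (PySem.List.enumerate l k).foldl (pvStepB cX cY) (bi, some bd)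
    = (if (l.map (pvDist cX cY)).foldl min bd < bd
       then (k + (((l.map (pvDist cX cY)).idxOf ((l.map (pvDist cX cY)).foldl min bd) : Nat) : Int),
             some ((l.map (pvDist cX cY)).foldl min bd))
       else (bi, some bd)) := by
  intro l
  induction l with
  | nil => intro k bi bd; simp [PySem.List.enumerate_nil]
  | cons p rest ih =>
    intro k bi bd
    have hmle : ∀ (a : Int), (rest.map (pvDist cX cY)).foldl min a ≤ a :=
      fun a => (PySem.List.foldl_min_le (rest.map (pvDist cX cY)) a).1
    rw [PySem.List.enumerate_cons, List.foldl_cons]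
    by_cases hlt : pvDist cX cY p < bd
    · have hstep : pvStepB cX cY (bi, some bd) ((k : Int), p) = (k, some (pvDist cX cY p)) := by
        simp only [pvStepB]
        exact if_pos hlt
      rw [hstep, ih (k+1) k (pvDist cX cY p)]
      have hmm : ((p :: rest).map (pvDist cX cY)).foldl min bd
          = (rest.map (pvDist cX cY)).foldl min (pvDist cX cY p) := by
        simp only [List.map_cons, List.foldl_cons]
        rw [pvFoldlMinMin, min_eq_right (le_trans (hmle _) (le_of_lt hlt))]
      by_cases h2 : (rest.map (pvDist cX cY)).foldl min (pvDist cX cY p) < pvDist cX cY p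
      · have hne : (pvDist cX cY p == (rest.map (pvDist cX cY)).foldl min (pvDist cX cY p)) = false := by
          simp; omega
        rw [if_pos h2, hmm, if_pos (lt_trans h2 hlt)]
        simp only [List.map_cons, List.idxOf_cons, hne, cond_false]
        push_cast
        ring_nf
      · have heq : (rest.map (pvDist cX cY)).foldl min (pvDist cX cY p) = pvDist cX cY p :=
          le_antisymm (hmle _) (not_lt.mp h2)
        rw [if_neg h2, hmm, heq, if_pos hlt]
        simp
    · have hstep : pvStepB cX cY (bi, some bd) ((k : Int), p) = (bi, some bd) := by
        simp only [pvStepB]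
        exact if_neg hlt
      rw [hstep, ih (k+1) bi bd]
      have hmm : ((p :: rest).map (pvDist cX cY)).foldl min bd
          = (rest.map (pvDist cX cY)).foldl min bd := by
        simp only [List.map_cons, List.foldl_cons]
        rw [min_eq_left (not_lt.mp hlt)]
      rw [hmm]
      by_cases h2 : (rest.map (pvDist cX cY)).foldl min bd < bd
      · have hne : (pvDist cX cY p == (rest.map (pvDist cX cY)).foldl min bd) = false := by
          simp
          have := not_lt.mp hlt; omega
        rw [if_pos h2, if_pos h2]
        simp only [List.map_cons, List.idxOf_cons, hne, cond_false]
        push_cast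
        ring_nf
      · rw [if_neg h2, if_neg h2]

-- ===== VERDICT (by name: the statement is the Claim_ definition above) =====
theorem find_closest_coord_spec : Claim_equal_find_closest_coord := by
  intro cX cY coords _ hpre
  unfold Spec_find_closest_coord
  obtain ⟨c, cs, rfl⟩ : ∃ c cs, coords = c :: cs := by
    cases coords with
    | nil => exact absurd rfl hpre
    | cons c cs => exact ⟨c, cs, rfl⟩
  -- restate both ports through the named step functions (definitional)
  have hA : find_closest_coord cX cY (c :: cs)
      = (let st := (PySem.List.pyRange 0 (((c :: cs).length : Nat) : Int) 1).foldl
            (pvStepA cX cY (c :: cs)) ([], [])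
         match PySem.List.min? st.1 (fun d => d) with
         | none => 0
         | some m =>
           match PySem.List.index? st.1 m with
           | none => 0
           | some idx =>
             match PySem.List.pyGet? st.2 ((idx : Nat) : Int) with
             | some number => number
             | none => 0) := rfl
  have hB : find_closest_coord_alt cX cY (c :: cs)
      = ((PySem.List.enumerate (c :: cs) 0).foldl (pvStepB cX cY) (0, none)).1 := rfl
  rw [hA, hB]
  -- evaluate A's loop
  have hAf := pvAFold cX cY (c :: cs) [] [] []
  simp only [List.length_nil, Nat.cast_zero, List.nil_append, zero_add] at hAf
  rw [hAf]
  set dists := (c :: cs).map (pvDist cX cY) with hdists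
  set m := (cs.map (pvDist cX cY)).foldl min (pvDist cX cY c) with hm
  have hmin : PySem.List.min? dists (fun d => d) = some m := by
    rw [hdists, List.map_cons, PySem.List.min?_id_cons]
  have hmmem : m ∈ dists := PySem.List.min?_mem hmin
  have hidx : PySem.List.index? dists m = some (dists.idxOf m) := by
    rw [PySem.List.index?_eq_idxOf?, pvIdxOf?_of_mem _ _ hmmem]
  have hidxlt : dists.idxOf m < (c :: cs).length := by
    have := List.idxOf_lt_length_of_mem hmmem
    simpa [hdists] using this
  have hnum : PySem.List.pyGet? (PySem.List.pyRange 0 (((c :: cs).length : Nat) : Int) 1)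
      ((dists.idxOf m : Nat) : Int) = some ((dists.idxOf m : Nat) : Int) := by
    rw [PySem.List.pyGet?_natCast, PySem.List.pyRange_one]
    have h' : List.idxOf m dists < cs.length + 1 := by simpa using hidxlt
    simp [h']
  simp only [hmin, hidx, hnum]
  -- evaluate B's loop
  rw [PySem.List.enumerate_cons]
  rw [List.foldl_cons]
  have hstep0 : pvStepB cX cY (0, none) ((0 : Int), c) = (0, some (pvDist cX cY c)) := rfl
  rw [hstep0, pvBFold cX cY cs (0 + 1) 0 (pvDist cX cY c)]
  have hmle : m ≤ pvDist cX cY c := (PySem.List.foldl_min_le (cs.map (pvDist cX cY)) _).1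
  by_cases h2 : (cs.map (pvDist cX cY)).foldl min (pvDist cX cY c) < pvDist cX cY c
  · have hne : (pvDist cX cY c == m) = false := by
      rw [hm]; simp; omega
    rw [if_pos h2]
    simp only [hdists, List.map_cons, List.idxOf_cons, hne, cond_false, ← hm]
    push_cast
    ring_nf
  · have heq : m = pvDist cX cY c := le_antisymm hmle (not_lt.mp (hm ▸ h2))
    rw [if_neg h2]
    simp [hdists, heq]
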